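-- pv_equiv track=rewrite | github.com/FlandreSatori/astrbot_plugin_steam_friend_monitor | main.py | _is_host_in_domains
-- ===== SOURCE A (Python) =====
-- from typing import Any, Dict, List
--
-- def _is_host_in_domains(host: str, domains: List[str]) -> bool:
--     host = (host or "").strip().lower()
--     if not host:
--         return False
--     for d in domains:
--         if host == d or host.endswith("." + d):
--             return True
--     return False
-- ===== SOURCE B (Python) =====
-- def _is_host_in_domains(host, domains):
--     # Precompute the set of suffix candidates of host (host itself plus every
--     # tail following a dot), then a single set-membership test per domain.
--     host = (host or "").strip().lower()
--     if not host:
--         return False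
--     candidates = {host}
--     for i, ch in enumerate(host):
--         if ch == ".":
--             candidates.add(host[i + 1:])
--     return any(d in candidates for d in domains)
-- ===== Notes on version B (the rewrite author's own statement) =====
-- stated objective: alternative
-- what changed: Instead of testing '==' / endswith('.'+d) per domain, B precomputes the set of dot-delimited suffixes of the host in one pass and checks each domain by set membership.
import Mathlib
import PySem

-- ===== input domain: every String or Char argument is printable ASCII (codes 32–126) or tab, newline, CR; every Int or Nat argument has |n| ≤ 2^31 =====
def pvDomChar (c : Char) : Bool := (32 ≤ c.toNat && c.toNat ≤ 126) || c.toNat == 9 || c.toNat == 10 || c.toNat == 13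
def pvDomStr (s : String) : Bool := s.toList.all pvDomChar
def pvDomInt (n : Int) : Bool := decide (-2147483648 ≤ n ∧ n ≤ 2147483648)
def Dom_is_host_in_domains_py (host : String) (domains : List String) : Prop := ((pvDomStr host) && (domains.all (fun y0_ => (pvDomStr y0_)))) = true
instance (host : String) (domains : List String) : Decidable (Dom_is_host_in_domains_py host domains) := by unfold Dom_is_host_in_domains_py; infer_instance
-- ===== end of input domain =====

-- B replaces the per-domain '==' / endswith('.'+d) tests by a precomputed set of
-- dot-delimited suffixes of the host and one membership test per domain (alternative).

-- ===== PORT A =====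
-- the 'for d in domains' loop of A, returning True on the first hit
def pvALoop (h : String) : List String → Bool
  | [] => false
  | d :: ds => if h == d || PySem.Str.endswith h ("." ++ d) then true else pvALoop h ds

def is_host_in_domains_py (host : String) (domains : List String) : Bool :=
  let h := PySem.Str.lower (PySem.Str.strip host)
  if h == "" then false
  else pvALoop h domains

-- ===== PORT B =====
-- Source B's one pass over the host: at every '.', record the tail following it
-- (host[i+1:] at index i of a dot = the list tail after that dot)
def pvDotTails : List Char → List (List Char)
  | [] => []
  | c :: rest => if c = '.' then rest :: pvDotTails rest else pvDotTails rest

def is_host_in_domains_py_alt (host : String) (domains : List String) : Bool :=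
  let h := PySem.Str.lower (PySem.Str.strip host)
  if h == "" then false
  else
    let candidates : PySem.Set String :=
      PySem.Set.ofList (h :: (pvDotTails h.toList).map (fun t => String.ofList t))
    domains.any (fun d => PySem.Set.contains candidates d)

-- ===== PRECONDITION & SPEC =====
def Spec_is_host_in_domains_py (host : String) (domains : List String) (out : Bool) : Prop := out = is_host_in_domains_py_alt host domains
instance (host : String) (domains : List String) (out : Bool) : Decidable (Spec_is_host_in_domains_py host domains out) := by unfold Spec_is_host_in_domains_py; infer_instance

-- ===== CLAIM (what is proved, stated in full; the proofs are below) =====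
def Claim_equal_is_host_in_domains_py : Prop := ∀ (host : String) (domains : List String), Dom_is_host_in_domains_py host domains → Spec_is_host_in_domains_py host domains (is_host_in_domains_py host domains)

-- ===== LEMMAS AND PROOFS =====

-- membership in pvDotTails l is exactly 'dot-prefixed suffix of l'
theorem mem_pvDotTails (l d : List Char) : d ∈ pvDotTails l ↔ ('.' :: d) <:+ l := by
  induction l with
  | nil => simp [pvDotTails]
  | cons c rest ih =>
    simp only [pvDotTails, List.suffix_cons_iff]
    split_ifs with hc
    · subst hc
      simp only [List.mem_cons, ih, List.cons.injEq]
      tauto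
    · simp only [ih]
      constructor
      · exact Or.inr
      · rintro (h | h)
        · cases h; exact absurd rfl hc
        · exact h

theorem mem_map_mk (L : List (List Char)) (d : String) :
    d ∈ L.map (fun t => String.ofList t) ↔ d.toList ∈ L := by
  simp only [List.mem_map]
  constructor
  · rintro ⟨t, ht, rfl⟩; simpa using ht
  · intro h; exact ⟨d.toList, h, by simp⟩

-- A's per-domain test is true iff host equals d or '.'+d is a suffix of host
theorem lhs_iff (h d : String) :
    (h == d || PySem.Str.endswith h ("." ++ d)) = true
      ↔ (h = d ∨ ('.' :: d.toList) <:+ h.toList) := by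
  rw [Bool.or_eq_true, beq_iff_eq]
  apply or_congr Iff.rfl
  rw [show PySem.Str.endswith h ("." ++ d)
        = PySem.Chars.endswith h.toList ('.' :: d.toList) from by simp]
  exact PySem.Chars.endswith_iff _ _

-- A's per-domain test equals membership in B's candidate set
theorem test_eq_contains (h d : String) :
    (h == d || PySem.Str.endswith h ("." ++ d))
      = PySem.Set.contains
          (PySem.Set.ofList (h :: (pvDotTails h.toList).map (fun t => String.ofList t))) d := by
  rw [Bool.eq_iff_iff, lhs_iff, PySem.Set.contains_iff, PySem.Set.mem_ofList,
      List.mem_cons, mem_map_mk, mem_pvDotTails]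
  constructor
  · rintro (rfl | hs)
    · exact Or.inl rfl
    · exact Or.inr hs
  · rintro (rfl | hs)
    · exact Or.inl rfl
    · exact Or.inr hs

-- A's loop equals B's any-over-the-candidate-set
theorem loop_eq_any (h : String) (domains : List String) :
    pvALoop h domains
      = domains.any (fun d => PySem.Set.contains
          (PySem.Set.ofList (h :: (pvDotTails h.toList).map (fun t => String.ofList t))) d) := by
  induction domains with
  | nil => rfl
  | cons d ds ih =>
    rw [List.any_cons, ← ih]
    show (if _ then _ else _) = _
    rw [test_eq_contains]
    generalize PySem.Set.contains _ d = c
    cases c <;> simp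

-- ===== VERDICT (by name: the statement is the Claim_ definition above) =====
theorem is_host_in_domains_py_spec : Claim_equal_is_host_in_domains_py := by
  intro host domains _
  unfold Spec_is_host_in_domains_py is_host_in_domains_py is_host_in_domains_py_alt
  simp only []
  split_ifs
  · rfl
  · exact loop_eq_any _ _
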